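-- pv_equiv track=rewrite | github.com/AbyssV/practicing | code example/Python/q1solution.py | category_leaders
-- ===== SOURCE A (Python) =====
-- def category_leaders(db : {str : (str,int,int)}) -> [int,{str}]:
--     answer = {}
--     for n,pqs in db.items():
--         for p,_q,s in pqs:
--             if p not in answer or answer[p][0] < s:
--                 answer[p] = [s,{n}]
--             elif answer[p][0] == s:
--                 answer[p][1].add(n)
--     return answer
-- ===== SOURCE B (Python) =====
-- def category_leaders(db):
--     # Pass 0: flatten to (product, name, score) entries in scan order.
--     entries = [(p, n, s) for n, pqs in db.items() for p, _q, s in pqs]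
--     # Pass 1: per-product maximum score (same strict-< update as a comparison loop).
--     best = {}
--     for p, _n, s in entries:
--         if p not in best or best[p] < s:
--             best[p] = s
--     # Pass 2: collect the leaders; keys appear at a product's first entry.
--     answer = {}
--     for p, n, s in entries:
--         b = best[p]
--         if p not in answer:
--             answer[p] = [b, set()]
--         if s == b:
--             answer[p][1].add(n)
--     return answer
-- ===== Notes on version B (the rewrite author's own statement) =====
-- stated objective: alternative
-- what changed: Replaces A's single pass that maintains [max,names] jointly (resetting the name set whenever a larger score appears) with a flatten step plus two separate passes: one computing each product's maximum score, then one collecting every name whose score equals that maximum.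
import Mathlib
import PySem

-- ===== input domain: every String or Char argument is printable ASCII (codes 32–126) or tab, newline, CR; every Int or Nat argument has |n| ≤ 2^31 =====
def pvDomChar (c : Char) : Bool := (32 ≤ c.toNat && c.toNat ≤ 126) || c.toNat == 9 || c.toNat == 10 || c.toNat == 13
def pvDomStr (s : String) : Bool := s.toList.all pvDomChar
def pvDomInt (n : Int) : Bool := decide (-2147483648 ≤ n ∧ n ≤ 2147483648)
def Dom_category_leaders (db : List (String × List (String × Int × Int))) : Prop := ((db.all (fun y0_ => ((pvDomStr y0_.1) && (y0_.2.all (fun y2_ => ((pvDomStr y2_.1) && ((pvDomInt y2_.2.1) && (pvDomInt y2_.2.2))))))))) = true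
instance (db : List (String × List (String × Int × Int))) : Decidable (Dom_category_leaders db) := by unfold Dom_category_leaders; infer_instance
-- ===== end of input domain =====

-- B replaces A's single joint pass by a flatten step and two separate passes (max per product, then collect
-- the names attaining it); same cost class, proved to return the identical dict (same key and name order).

-- ===== PORT A =====
-- literal port of A: one pass over db, dict answer : product ↦ [max score so far, set of names]
def category_leaders (db : List (String × List (String × Int × Int))) : List (String × Int × List String) :=
  (db.foldl (fun answer npqs =>
      npqs.2.foldl (fun answer pqs =>
        match PySem.Dict.get? answer pqs.1 with
        | none => PySem.Dict.insert answer pqs.1 (pqs.2.2, PySem.Set.ofList [npqs.1])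
        | some v =>
          if v.1 < pqs.2.2 then PySem.Dict.insert answer pqs.1 (pqs.2.2, PySem.Set.ofList [npqs.1])
          else if v.1 == pqs.2.2 then
            -- answer[p][1].add(n): in-place update = overwrite at the same key position
            PySem.Dict.insert answer pqs.1 (v.1, PySem.Set.add v.2 npqs.1)
          else answer) answer)
    (PySem.Dict.empty : PySem.Dict String (Int × List String))).items

-- ===== PORT B =====
-- port of Source B: flatten to (product, name, score) entries, pass 1 computes best, pass 2 collects leaders
def category_leaders_alt (db : List (String × List (String × Int × Int))) : List (String × Int × List String) :=
  let entries := db.flatMap (fun npqs => npqs.2.map (fun pqs => (pqs.1, npqs.1, pqs.2.2)))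
  let best : PySem.Dict String Int := entries.foldl (fun best e =>
      match PySem.Dict.get? best e.1 with
      | none => PySem.Dict.insert best e.1 e.2.2
      | some m => if m < e.2.2 then PySem.Dict.insert best e.1 e.2.2 else best)
    PySem.Dict.empty
  let answer : PySem.Dict String (Int × List String) := entries.foldl (fun ans e =>
      -- b = best[p]; the key is always present after pass 1, so getD is exact here (no KeyError possible)
      let b := PySem.Dict.getD best e.1 0
      let ans := if PySem.Dict.contains ans e.1 then ans
                 else PySem.Dict.insert ans e.1 (b, PySem.Set.empty)
      if e.2.2 == b then
        PySem.Dict.modify ans e.1 (0, PySem.Set.empty) (fun v => (v.1, PySem.Set.add v.2 e.2.1))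
      else ans)
    PySem.Dict.empty
  answer.items

-- ===== PRECONDITION & SPEC =====
def Spec_category_leaders (db : List (String × List (String × Int × Int))) (out : List (String × Int × List String)) : Prop := out = category_leaders_alt db
instance (db : List (String × List (String × Int × Int))) (out : List (String × Int × List String)) : Decidable (Spec_category_leaders db out) := by unfold Spec_category_leaders; infer_instance

-- ===== CLAIM (what is proved, stated in full; the proofs are below) =====
def Claim_equal_category_leaders : Prop := ∀ (db : List (String × List (String × Int × Int))), Dom_category_leaders db → Spec_category_leaders db (category_leaders db)

-- ===== LEMMAS AND PROOFS =====

-- flat entry type: (product, name, score)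
def pvFlatten (db : List (String × List (String × Int × Int))) : List (String × String × Int) :=
  db.flatMap (fun npqs => npqs.2.map (fun pqs => (pqs.1, npqs.1, pqs.2.2)))

def pvStepA (d : PySem.Dict String (Int × List String)) (e : String × String × Int) :
    PySem.Dict String (Int × List String) :=
  match PySem.Dict.get? d e.1 with
  | none => PySem.Dict.insert d e.1 (e.2.2, PySem.Set.ofList [e.2.1])
  | some v =>
    if v.1 < e.2.2 then PySem.Dict.insert d e.1 (e.2.2, PySem.Set.ofList [e.2.1])
    else if v.1 == e.2.2 then PySem.Dict.insert d e.1 (v.1, PySem.Set.add v.2 e.2.1)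
    else d

def pvStepBest (best : PySem.Dict String Int) (e : String × String × Int) : PySem.Dict String Int :=
  match PySem.Dict.get? best e.1 with
  | none => PySem.Dict.insert best e.1 e.2.2
  | some m => if m < e.2.2 then PySem.Dict.insert best e.1 e.2.2 else best

def pvStepC (best : PySem.Dict String Int) (ans : PySem.Dict String (Int × List String))
    (e : String × String × Int) : PySem.Dict String (Int × List String) :=
  let b := PySem.Dict.getD best e.1 0
  let ans := if PySem.Dict.contains ans e.1 then ans
             else PySem.Dict.insert ans e.1 (b, PySem.Set.empty)
  if e.2.2 == b then
    PySem.Dict.modify ans e.1 (0, PySem.Set.empty) (fun v => (v.1, PySem.Set.add v.2 e.2.1))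
  else ans

-- running max of p's scores (A's comparison order)
def pvMaxS (es : List (String × String × Int)) (p : String) : Option Int :=
  es.foldl (fun m e =>
    if e.1 = p then
      match m with
      | none => some e.2.2
      | some m0 => if m0 < e.2.2 then some e.2.2 else some m0
    else m) none

def pvKeys (es : List (String × String × Int)) : List String :=
  PySem.Set.ofList (es.map (·.1))

def pvLdrs (es : List (String × String × Int)) (p : String) (m : Int) : List String :=
  PySem.Set.ofList ((es.filter (fun e => e.1 = p && e.2.2 == m)).map (·.2.1))

def pvVal (es : List (String × String × Int)) (p : String) : Int × List String :=
  ((pvMaxS es p).getD 0, pvLdrs es p ((pvMaxS es p).getD 0))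

theorem pvGet?_mk_map {v : Type} (K : List String) (f : String → v) (q : String) :
    (PySem.Dict.mk (K.map (fun p => (p, f p)))).get? q = if q ∈ K then some (f q) else none := by
  induction K with
  | nil => simp [PySem.Dict.get?]
  | cons k K ih =>
    simp only [List.map_cons, PySem.Dict.get?_mk_cons, ih, List.mem_cons]
    by_cases h : k = q
    · subst h; simp
    · simp [h, Ne.symm h]

theorem pvContains_mk_map {v : Type} (K : List String) (f : String → v) (q : String) :
    (PySem.Dict.mk (K.map (fun p => (p, f p)))).contains q = decide (q ∈ K) := by
  by_cases h : q ∈ K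
  · simp only [h, decide_true]
    simp [PySem.Dict.contains, List.any_map, Function.comp_def, List.any_eq_true]
    exact h
  · simp only [h, decide_false]
    simp [PySem.Dict.contains, List.any_map, Function.comp_def]
    intro x hx hc
    exact h (hc ▸ hx)

theorem pvInsert_mk_map {v : Type} (K : List String) (f : String → v) (q : String) (w : v) :
    (PySem.Dict.mk (K.map (fun p => (p, f p)))).insert q w =
      PySem.Dict.mk ((PySem.Set.add K q).map (fun p => (p, if p = q then w else f p))) := by
  by_cases h : q ∈ K
  · rw [PySem.Dict.insert]
    simp only [pvContains_mk_map, h, decide_true, if_true]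
    rw [PySem.Set.add_of_mem h]
    congr 1
    simp only [List.map_map]
    apply List.map_congr_left
    intro p _
    by_cases hp : p = q
    · subst hp; simp
    · simp [hp, Function.comp]
  · rw [PySem.Dict.insert]
    simp only [pvContains_mk_map, h, decide_false, Bool.false_eq_true, if_false]
    rw [PySem.Set.add_of_not_mem h]
    simp only [List.map_append, List.map_cons, List.map_nil]
    have h1 : K.map (fun p => (p, if p = q then w else f p)) = K.map (fun p => (p, f p)) := by
      apply List.map_congr_left
      intro p hp
      have hne : p ≠ q := fun hpq => h (hpq ▸ hp)
      simp [hne]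
    rw [h1]
    simp

theorem pvKeys_append (es : List (String × String × Int)) (e : String × String × Int) :
    pvKeys (es ++ [e]) = PySem.Set.add (pvKeys es) e.1 := by
  simp [pvKeys, PySem.Set.ofList_append_singleton]

theorem pvMaxS_append (es : List (String × String × Int)) (e : String × String × Int) (p : String) :
    pvMaxS (es ++ [e]) p =
      if e.1 = p then
        match pvMaxS es p with
        | none => some e.2.2
        | some m0 => if m0 < e.2.2 then some e.2.2 else some m0
      else pvMaxS es p := by
  simp [pvMaxS, List.foldl_append]

theorem pvMaxS_none (es : List (String × String × Int)) (p : String) :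
    pvMaxS es p = none ↔ p ∉ pvKeys es := by
  induction es using List.reverseRecOn with
  | nil => simp [pvMaxS, pvKeys, PySem.Set.ofList_nil]
  | append_singleton es e ih =>
    rw [pvMaxS_append, pvKeys_append]
    by_cases hc : e.1 = p
    · rw [if_pos hc]
      constructor
      · intro h
        cases hms : pvMaxS es p <;> rw [hms] at h <;> dsimp only at h
        · exact absurd h (by simp)
        · split at h <;> simp at h
      · intro h
        exact absurd (by rw [PySem.Set.mem_add]; right; exact hc.symm) h
    · rw [if_neg hc, ih, PySem.Set.mem_add]
      constructor
      · intro h hmem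
        rcases hmem with h1 | h2
        · exact h h1
        · exact hc h2.symm
      · intro h h1; exact h (Or.inl h1)

theorem pvMaxS_ge (es : List (String × String × Int)) (p : String) (m0 : Int)
    (h : pvMaxS es p = some m0) : ∀ e ∈ es, e.1 = p → e.2.2 ≤ m0 := by
  induction es using List.reverseRecOn generalizing m0 with
  | nil => simp
  | append_singleton es e ih =>
    rw [pvMaxS_append] at h
    intro e' he' hp'
    rcases List.mem_append.1 he' with hmem | hlast
    · by_cases hc : e.1 = p
      · rw [if_pos hc] at h
        cases hms : pvMaxS es p with
        | none =>
          exact absurd ((pvMaxS_none es p).1 hms)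
            (by intro hk; exact hk (by rw [pvKeys, PySem.Set.mem_ofList]; exact List.mem_map.2 ⟨e', hmem, hp'⟩))
        | some m1 =>
          rw [hms] at h; dsimp only at h
          have h1 := ih m1 hms e' hmem hp'
          by_cases hlt : m1 < e.2.2
          · rw [if_pos hlt] at h; injection h with h; omega
          · rw [if_neg hlt] at h; injection h with h; omega
      · rw [if_neg hc] at h
        exact ih m0 h e' hmem hp'
    · have he : e' = e := by simpa using hlast
      subst he
      rw [if_pos hp'] at h
      cases hms : pvMaxS es p with
      | none => rw [hms] at h; dsimp only at h; injection h with h; omega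
      | some m1 =>
        rw [hms] at h; dsimp only at h
        by_cases hlt : m1 < e'.2.2
        · rw [if_pos hlt] at h; injection h with h; omega
        · rw [if_neg hlt] at h; injection h with h; omega

theorem pvLdrs_append (es : List (String × String × Int)) (e : String × String × Int)
    (p : String) (m : Int) :
    pvLdrs (es ++ [e]) p m =
      if e.1 = p ∧ e.2.2 = m then PySem.Set.add (pvLdrs es p m) e.2.1 else pvLdrs es p m := by
  by_cases h : e.1 = p ∧ e.2.2 = m
  · rw [if_pos h]
    simp [pvLdrs, List.filter_append, h.1, h.2, PySem.Set.ofList_append_singleton]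
  · rw [if_neg h]
    have : (e.1 = p && e.2.2 == m) = false := by
      by_cases h1 : e.1 = p
      · by_cases h2 : e.2.2 = m
        · exact absurd ⟨h1, h2⟩ h
        · simp [h1, h2]
      · simp [h1]
    simp [pvLdrs, List.filter_append, this]

theorem pvLdrs_nil (es : List (String × String × Int)) (p : String) (m : Int)
    (h : ∀ e ∈ es, e.1 = p → e.2.2 ≠ m) : pvLdrs es p m = [] := by
  have : es.filter (fun e => e.1 = p && e.2.2 == m) = [] := by
    rw [List.filter_eq_nil_iff]
    intro e he
    by_cases h1 : e.1 = p
    · simp [h1, h e he h1]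
    · simp [h1]
  simp [pvLdrs, this, PySem.Set.ofList_nil]

theorem pvA_flat (db : List (String × List (String × Int × Int)))
    (init : PySem.Dict String (Int × List String)) :
    db.foldl (fun answer npqs =>
      npqs.2.foldl (fun answer pqs =>
        match PySem.Dict.get? answer pqs.1 with
        | none => PySem.Dict.insert answer pqs.1 (pqs.2.2, PySem.Set.ofList [npqs.1])
        | some v =>
          if v.1 < pqs.2.2 then PySem.Dict.insert answer pqs.1 (pqs.2.2, PySem.Set.ofList [npqs.1])
          else if v.1 == pqs.2.2 then PySem.Dict.insert answer pqs.1 (v.1, PySem.Set.add v.2 npqs.1)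
          else answer) answer) init
      = (pvFlatten db).foldl pvStepA init := by
  induction db generalizing init with
  | nil => simp [pvFlatten]
  | cons x db ih =>
    simp only [List.foldl_cons, pvFlatten, List.flatMap_cons, List.foldl_append]
    rw [ih]
    congr 1
    rw [List.foldl_map]
    rfl

-- A's fold computes the pointwise characterisation
theorem pvA_char (es : List (String × String × Int)) :
    (es.foldl pvStepA PySem.Dict.empty).items = (pvKeys es).map (fun p => (p, pvVal es p)) := by
  induction es using List.reverseRecOn with
  | nil => simp [pvKeys, PySem.Set.ofList_nil, PySem.Dict.empty]
  | append_singleton es e ih =>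
    rw [List.foldl_append, List.foldl_cons, List.foldl_nil]
    have hD : es.foldl pvStepA PySem.Dict.empty
        = PySem.Dict.mk ((pvKeys es).map (fun p => (p, pvVal es p))) := by
      apply PySem.Dict.ext; exact ih
    rw [hD, pvKeys_append]
    rw [pvStepA, pvGet?_mk_map]
    by_cases hmem : e.1 ∈ pvKeys es
    · rw [if_pos hmem]
      dsimp only
      have hsome : pvMaxS es e.1 = some ((pvMaxS es e.1).getD 0) := by
        cases hms : pvMaxS es e.1 with
        | none => exact absurd ((pvMaxS_none es e.1).1 hms) (by simp [hmem])
        | some m => rfl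
      set m : Int := (pvMaxS es e.1).getD 0 with hm
      by_cases hlt : (pvVal es e.1).1 < e.2.2
      · rw [if_pos hlt]
        rw [pvInsert_mk_map]
        dsimp only [PySem.Dict.items]
        apply List.map_congr_left
        intro p hp
        by_cases hpe : p = e.1
        · subst hpe
          simp only [if_pos rfl]
          have hmax : pvMaxS (es ++ [e]) e.1 = some e.2.2 := by
            rw [pvMaxS_append, if_pos rfl, hsome]
            dsimp only
            rw [if_pos (by exact hlt)]
          have hld : pvLdrs (es ++ [e]) e.1 e.2.2 = PySem.Set.add [] e.2.1 := by
            rw [pvLdrs_append, if_pos ⟨rfl, rfl⟩]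
            rw [pvLdrs_nil]
            intro e' he' hp'
            have := pvMaxS_ge es e.1 m hsome e' he' hp'
            intro hc; rw [hc] at this
            exact absurd hlt (by simp [pvVal, ← hm]; omega)
          simp [pvVal, hmax, hld, PySem.Set.add, PySem.Set.ofList]
        · simp only [if_neg hpe]
          have hne : e.1 ≠ p := fun hc => hpe hc.symm
          simp [pvVal, pvMaxS_append, pvLdrs_append, hne]
      · rw [if_neg hlt]
        by_cases heq : (pvVal es e.1).1 = e.2.2
        · rw [if_pos (by simpa using heq)]
          rw [pvInsert_mk_map]
          dsimp only [PySem.Dict.items]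
          apply List.map_congr_left
          intro p hp
          by_cases hpe : p = e.1
          · subst hpe
            simp only [if_pos rfl]
            have hmax : pvMaxS (es ++ [e]) e.1 = some m := by
              rw [pvMaxS_append, if_pos rfl, hsome]
              dsimp only
              have : ¬ m < e.2.2 := by simpa [pvVal, ← hm] using hlt
              rw [if_neg this]
            have hsm : e.2.2 = m := by simpa [pvVal, ← hm] using heq.symm
            have hld : pvLdrs (es ++ [e]) e.1 m = PySem.Set.add (pvLdrs es e.1 m) e.2.1 := by
              rw [pvLdrs_append, if_pos ⟨rfl, hsm⟩]
            simp [pvVal, hmax, hld, ← hm]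
          · simp only [if_neg hpe]
            have hne : e.1 ≠ p := fun hc => hpe hc.symm
            simp [pvVal, pvMaxS_append, pvLdrs_append, hne]
        · rw [if_neg (by simpa using heq)]
          have hadd : PySem.Set.add (pvKeys es) e.1 = pvKeys es := PySem.Set.add_of_mem hmem
          rw [hadd]
          dsimp only [PySem.Dict.items]
          apply List.map_congr_left
          intro p hp
          by_cases hpe : p = e.1
          · subst hpe
            have hmax : pvMaxS (es ++ [e]) e.1 = some m := by
              rw [pvMaxS_append, if_pos rfl, hsome]
              dsimp only
              have : ¬ m < e.2.2 := by simpa [pvVal, ← hm] using hlt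
              rw [if_neg this]
            have hsm : ¬ (e.2.2 = m) := by
              intro hc; exact heq (by simp [pvVal, ← hm, hc])
            have hld : pvLdrs (es ++ [e]) e.1 m = pvLdrs es e.1 m := by
              rw [pvLdrs_append, if_neg (by rintro ⟨_, h2⟩; exact hsm h2)]
            simp [pvVal, hmax, hld, ← hm]
          · have hne : e.1 ≠ p := fun hc => hpe hc.symm
            simp [pvVal, pvMaxS_append, pvLdrs_append, hne]
    · rw [if_neg hmem]
      dsimp only
      rw [pvInsert_mk_map]
      dsimp only [PySem.Dict.items]
      apply List.map_congr_left
      intro p hp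
      by_cases hpe : p = e.1
      · subst hpe
        simp only [if_pos rfl]
        have hnone : pvMaxS es e.1 = none := (pvMaxS_none es e.1).2 hmem
        have hmax : pvMaxS (es ++ [e]) e.1 = some e.2.2 := by
          rw [pvMaxS_append, if_pos rfl, hnone]
        have hld : pvLdrs (es ++ [e]) e.1 e.2.2 = PySem.Set.add (pvLdrs es e.1 e.2.2) e.2.1 := by
          rw [pvLdrs_append, if_pos ⟨rfl, rfl⟩]
        have hnil : pvLdrs es e.1 e.2.2 = [] := by
          apply pvLdrs_nil
          intro e' he' hp' _
          exact hmem (by rw [pvKeys, PySem.Set.mem_ofList]; exact List.mem_map.2 ⟨e', he', hp'⟩)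
        simp [pvVal, hmax, hld, hnil, PySem.Set.add, PySem.Set.ofList]
      · simp only [if_neg hpe]
        have hne : e.1 ≠ p := fun hc => hpe hc.symm
        simp [pvVal, pvMaxS_append, pvLdrs_append, hne]

-- pass 1 of B computes pvMaxS
theorem pvBest_char (es : List (String × String × Int)) (p : String) :
    (es.foldl pvStepBest PySem.Dict.empty).get? p = pvMaxS es p := by
  induction es using List.reverseRecOn with
  | nil => simp [pvMaxS, PySem.Dict.get?_empty]
  | append_singleton es e ih =>
    rw [List.foldl_append, List.foldl_cons, List.foldl_nil, pvMaxS_append, pvStepBest]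
    by_cases hpe : e.1 = p
    · subst hpe
      rw [if_pos rfl, ← ih]
      cases hg : (es.foldl pvStepBest PySem.Dict.empty).get? e.1 with
      | none =>
        dsimp only
        rw [PySem.Dict.get?_insert]
        simp
      | some m =>
        dsimp only
        by_cases hlt : m < e.2.2
        · rw [if_pos hlt, if_pos hlt, PySem.Dict.get?_insert]
          simp
        · rw [if_neg hlt, if_neg hlt]
          exact hg
    · rw [if_neg hpe, ← ih]
      have hne : p ≠ e.1 := fun hc => hpe hc.symm
      cases hg : (es.foldl pvStepBest PySem.Dict.empty).get? e.1 with
      | none =>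
        dsimp only
        rw [PySem.Dict.get?_insert]
        simp [hne]
      | some m =>
        dsimp only
        by_cases hlt : m < e.2.2
        · rw [if_pos hlt, PySem.Dict.get?_insert]
          simp [hne]
        · rw [if_neg hlt]

-- pass 2 of B, for a FIXED best dict
theorem pvC_char (best : PySem.Dict String Int) (es : List (String × String × Int)) :
    (es.foldl (pvStepC best) PySem.Dict.empty).items =
      (pvKeys es).map (fun p => (p, (PySem.Dict.getD best p 0,
        PySem.Set.ofList ((es.filter (fun e => e.1 = p && e.2.2 == PySem.Dict.getD best p 0)).map (·.2.1))))) := by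
  induction es using List.reverseRecOn with
  | nil => simp [pvKeys, PySem.Set.ofList_nil, PySem.Dict.empty]
  | append_singleton es e ih =>
    rw [List.foldl_append, List.foldl_cons, List.foldl_nil]
    have hD : es.foldl (pvStepC best) PySem.Dict.empty
        = PySem.Dict.mk ((pvKeys es).map (fun p => (p, (PySem.Dict.getD best p 0,
            PySem.Set.ofList ((es.filter (fun e => e.1 = p && e.2.2 == PySem.Dict.getD best p 0)).map (·.2.1)))))) := by
      apply PySem.Dict.ext; exact ih
    rw [hD, pvKeys_append, pvStepC]
    rw [pvContains_mk_map]
    by_cases hmem : e.1 ∈ pvKeys es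
    · simp only [hmem, decide_true, if_true]
      by_cases hsb : e.2.2 = PySem.Dict.getD best e.1 0
      · rw [if_pos (by simpa using hsb)]
        rw [PySem.Dict.modify, PySem.Dict.getD_eq_get?_getD, pvGet?_mk_map, if_pos hmem]
        dsimp only [Option.getD_some]
        rw [pvInsert_mk_map]
        dsimp only [PySem.Dict.items]
        apply List.map_congr_left
        intro p hp
        by_cases hpe : p = e.1
        · subst hpe
          simp [List.filter_append, hsb, PySem.Set.ofList_append_singleton]
        · have hne : ¬ (e.1 = p) := fun hc => hpe hc.symm
          simp [hpe, List.filter_append, hne]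
      · rw [if_neg (by simpa using hsb)]
        rw [PySem.Set.add_of_mem hmem]
        dsimp only [PySem.Dict.items]
        apply List.map_congr_left
        intro p hp
        by_cases hpe : p = e.1
        · subst hpe
          simp [List.filter_append, hsb]
        · have hne : ¬ (e.1 = p) := fun hc => hpe hc.symm
          simp [List.filter_append, hne]
    · simp only [hmem, decide_false, Bool.false_eq_true, if_false]
      have hfilnil : ∀ m : Int, es.filter (fun x => x.1 = e.1 && x.2.2 == m) = [] := by
        intro m
        rw [List.filter_eq_nil_iff]
        intro x hx
        have : ¬ (x.1 = e.1) := by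
          intro hc
          exact hmem (by rw [pvKeys, PySem.Set.mem_ofList]; exact List.mem_map.2 ⟨x, hx, hc⟩)
        simp [this]
      by_cases hsb : e.2.2 = PySem.Dict.getD best e.1 0
      · rw [if_pos (by simpa using hsb)]
        rw [PySem.Dict.modify, PySem.Dict.getD_insert_self, PySem.Dict.insert_insert_self]
        rw [pvInsert_mk_map]
        dsimp only [PySem.Dict.items]
        apply List.map_congr_left
        intro p hp
        by_cases hpe : p = e.1
        · subst hpe
          simp [List.filter_append, hsb, hfilnil, PySem.Set.add, PySem.Set.ofList]
        · have hne : ¬ (e.1 = p) := fun hc => hpe hc.symm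
          simp [hpe, List.filter_append, hne]
      · rw [if_neg (by simpa using hsb)]
        rw [pvInsert_mk_map]
        dsimp only [PySem.Dict.items]
        apply List.map_congr_left
        intro p hp
        by_cases hpe : p = e.1
        · subst hpe
          simp [List.filter_append, hsb, hfilnil, PySem.Set.ofList]
        · have hne : ¬ (e.1 = p) := fun hc => hpe hc.symm
          simp [hpe, List.filter_append, hne]

-- B's result in characterised form
theorem pvB_char (db : List (String × List (String × Int × Int))) :
    category_leaders_alt db = (pvKeys (pvFlatten db)).map (fun p => (p, pvVal (pvFlatten db) p)) := by
  show ((pvFlatten db).foldl (pvStepC ((pvFlatten db).foldl pvStepBest PySem.Dict.empty)) PySem.Dict.empty).items = _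
  rw [pvC_char]
  apply List.map_congr_left
  intro p hp
  have hbest : PySem.Dict.getD ((pvFlatten db).foldl pvStepBest PySem.Dict.empty) p 0
      = (pvMaxS (pvFlatten db) p).getD 0 := by
    rw [PySem.Dict.getD_eq_get?_getD, pvBest_char]
  rw [hbest]
  rfl

-- ===== VERDICT (by name: the statement is the Claim_ definition above) =====
theorem category_leaders_spec : Claim_equal_category_leaders := by
  intro db _
  show category_leaders db = category_leaders_alt db
  rw [pvB_char]
  unfold category_leaders
  rw [pvA_flat db PySem.Dict.empty, pvA_char]
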